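-- pv_equiv track=rewrite | github.com/NeuralNacho/ChessEngine | test.py | piece_on_square
-- ===== SOURCE A (Python) =====
-- def piece_on_square(row, col, fen):
--     counter = 0
--     marker = 0
--     t = fen_row(fen, row)
--     while counter <= col:
--         y = fen[t + marker]
--         if is_int(y):
--             counter = counter + int(y)
--         elif y.isalpha():
--             counter = counter + 1
--         marker = marker + 1
--     if is_int(fen[t + marker - 1]):
--         square = 'empty'
--     else:
--         square = fen[t + marker - 1]
--     return square
--
-- def is_int(s):
--     try:
--         int(s)
--         return True
--     except ValueError:
--         return False
--
-- def fen_row(fen, row):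
--     i = 0
--     x = 0
--     t = 0
--     while i < row:
--         y = fen[x]
--         if y == "/":
--             t = x + 1
--             i = i + 1
--         x = x + 1
--     return t
-- ===== SOURCE B (Python) =====
-- def piece_on_square(row, col, fen):
--     t = 0
--     for _ in range(row):
--         t = fen.index('/', t) + 1
--     # cumulative square counts: counts[i] = number of board squares described
--     # by the first i characters after the row start
--     counts = [0]
--     for y in fen[t:]:
--         counts.append(counts[-1] + (int(y) if is_int(y) else 1 if y.isalpha() else 0))
--     # least m with counts[m] > col: the m-th character resolves square col
--     lo, hi = 0, len(counts)
--     while lo < hi: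
--         mid = (lo + hi) // 2
--         if counts[mid] <= col:
--             lo = mid + 1
--         else:
--             hi = mid
--     y = fen[t + lo - 1]
--     return 'empty' if is_int(y) else y
--
-- def is_int(s):
--     try:
--         int(s)
--         return True
--     except ValueError:
--         return False
-- ===== Notes on version B (the rewrite author's own statement) =====
-- stated objective: alternative
-- what changed: B finds the row start with str.index, materializes the list of cumulative square counts for the row suffix and binary-searches it for the character resolving column col, replacing A's sequential counting loop with its post-loop re-examination of fen[t+marker-1] via a scalar counter and marker.
import Mathlib
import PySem

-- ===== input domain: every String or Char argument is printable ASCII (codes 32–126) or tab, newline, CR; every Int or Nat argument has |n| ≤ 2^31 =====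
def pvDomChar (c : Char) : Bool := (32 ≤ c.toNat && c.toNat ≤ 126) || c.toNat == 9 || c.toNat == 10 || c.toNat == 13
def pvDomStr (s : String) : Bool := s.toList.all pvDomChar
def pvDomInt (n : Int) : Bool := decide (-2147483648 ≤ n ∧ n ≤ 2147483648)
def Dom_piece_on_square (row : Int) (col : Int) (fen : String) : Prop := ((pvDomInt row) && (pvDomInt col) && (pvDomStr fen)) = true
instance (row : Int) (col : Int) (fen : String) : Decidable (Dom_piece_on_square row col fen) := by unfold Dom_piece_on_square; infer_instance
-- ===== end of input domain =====

-- B finds the row with str.index, materializes cumulative square counts for the row suffix and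
-- binary-searches them for the resolving character, replacing A's sequential counting loop with
-- its post-loop re-examination of fen[t+marker-1] (objective: alternative, same asymptotic cost).


-- ===== PORT A =====

-- is_int(y) for the one-character string y: int(y) succeeds
def pvIsInt (y : Char) : Bool := (PySem.Int.ofChars? [y]).isSome
-- int(y) for the one-character string y (only used under pvIsInt y)
def pvIntVal (y : Char) : Int := (PySem.Int.ofChars? [y]).getD 0

-- fen_row's while loop; cs is the suffix of fen starting at index x (fen[x] raising = cs exhausted, junk t returned, excluded by Pre_)
def fenRowLoopA (i row : Int) (x t : Nat) (cs : List Char) : Nat :=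
  if i < row then
    match cs with
    | [] => t
    | y :: rest =>
      if y = '/' then fenRowLoopA (i + 1) row (x + 1) (x + 1) rest
      else fenRowLoopA i row (x + 1) t rest
  else t

-- piece_on_square's while loop; cs is the suffix of fen starting at index t+marker; returns the final marker (none = IndexError)
def pieceLoopA (col counter : Int) (marker : Nat) (cs : List Char) : Option Nat :=
  if counter ≤ col then
    match cs with
    | [] => none
    | y :: rest =>
      pieceLoopA col
        (if pvIsInt y then counter + pvIntVal y
         else if PySem.Chars.isalpha y then counter + 1 else counter)
        (marker + 1) rest
  else some marker

def piece_on_square (row : Int) (col : Int) (fen : String) : String :=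
  let t := fenRowLoopA 0 row 0 0 fen.toList
  match pieceLoopA col 0 0 (fen.toList.drop t) with
  | none => ""  -- IndexError in the loop; excluded by Pre_
  | some marker =>
    match PySem.List.pyGet? fen.toList ((t : Int) + (marker : Int) - 1) with
    | none => ""  -- IndexError; excluded by Pre_
    | some y => if pvIsInt y then "empty" else String.ofList [y]

-- ===== PORT B =====

-- fen.index('/', t): first index ≥ t holding '/'; exact for a nonnegative in-range start and a
-- one-character needle (none = ValueError)
def bIdxFrom (cs : List Char) (t : Nat) : Option Nat :=
  ((cs.drop t).idxOf? '/').map (t + ·)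

-- the 'for _ in range(row)' loop of B (first argument = number of iterations left)
def bRowLoop : Nat → Nat → List Char → Option Nat
  | 0, t, _ => some t
  | n + 1, t, cs =>
    match bIdxFrom cs t with
    | none => none  -- ValueError; excluded by Pre_
    | some j => bRowLoop n (j + 1) cs

-- the 'for y in fen[t:]' loop building counts (counts[-1] ported as pyGetD counts (-1) 0;
-- counts is never empty, so the default is never used)
def bCountsLoop (counts : List Int) (cs : List Char) : List Int :=
  match cs with
  | [] => counts
  | y :: rest =>
    bCountsLoop (counts ++ [PySem.List.pyGetD counts (-1) 0 +
      (if pvIsInt y then pvIntVal y else if PySem.Chars.isalpha y then 1 else 0)]) rest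

-- the 'while lo < hi' binary search; lo, hi and mid are nonnegative throughout, so Nat
-- arithmetic with Nat division is exact for Python's (lo + hi) // 2, and counts[mid] is in
-- range (mid < hi ≤ len(counts)), ported as pyGetD
def bSearch (counts : List Int) (col : Int) (lo hi : Nat) : Nat :=
  if lo < hi then
    let mid := (lo + hi) / 2
    if PySem.List.pyGetD counts (mid : Int) 0 ≤ col then bSearch counts col (mid + 1) hi
    else bSearch counts col lo mid
  else lo
termination_by hi - lo
decreasing_by all_goals omega

def piece_on_square_alt (row : Int) (col : Int) (fen : String) : String :=
  match bRowLoop row.toNat 0 fen.toList with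
  | none => ""  -- ValueError; excluded by Pre_
  | some t =>
    let counts := bCountsLoop [0] (fen.toList.drop t)
    let lo := bSearch counts col 0 counts.length
    match PySem.List.pyGet? fen.toList ((t : Int) + (lo : Int) - 1) with
    | none => ""  -- IndexError; excluded by Pre_
    | some y => if pvIsInt y then "empty" else String.ofList [y]

-- ===== PRECONDITION & SPEC =====

-- index just after the row-th '/' (0 for row = 0; meaningful when cs holds at least row slashes)
def pvRowStart : Nat → List Char → Nat
  | 0, _ => 0
  | _ + 1, [] => 0
  | r + 1, c :: rest => 1 + (if c = '/' then pvRowStart r rest else pvRowStart (r + 1) rest)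

-- number of board squares one character describes (digits their value, letters one, all else zero)
def pvW (y : Char) : Int :=
  if pvIsInt y then pvIntVal y else if PySem.Chars.isalpha y then 1 else 0

-- number of board squares described by cs
def pvWeight (cs : List Char) : Int := (cs.map pvW).sum

-- Exactly the inputs on which A returns: at least row '/'s in fen, and either 0 ≤ col with enough
-- squares after the row start to reach column col, or col < 0, where A's skipped loop reads
-- fen[t-1] (Python wraparound at t = 0 needs a nonempty fen).
def Pre_piece_on_square (row : Int) (col : Int) (fen : String) : Prop :=
  row ≤ (fen.toList.count '/' : Int) ∧
    ((0 ≤ col ∧ col < pvWeight (fen.toList.drop (pvRowStart row.toNat fen.toList))) ∨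
     (col < 0 ∧ (1 ≤ pvRowStart row.toNat fen.toList ∨ fen.toList ≠ [])))

instance (row : Int) (col : Int) (fen : String) : Decidable (Pre_piece_on_square row col fen) := by
  unfold Pre_piece_on_square; infer_instance

def pvWitness_piece_on_square : Int × Int × String := (1, 2, "8/pppppppp/8")

def Spec_piece_on_square (row : Int) (col : Int) (fen : String) (out : String) : Prop := out = piece_on_square_alt row col fen
instance (row : Int) (col : Int) (fen : String) (out : String) : Decidable (Spec_piece_on_square row col fen out) := by unfold Spec_piece_on_square; infer_instance

-- ===== CLAIM (what is proved, stated in full; the proofs are below) =====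
def Claim_equal_piece_on_square : Prop := ∀ (row : Int) (col : Int) (fen : String), Dom_piece_on_square row col fen → Pre_piece_on_square row col fen → Spec_piece_on_square row col fen (piece_on_square row col fen)

-- ===== LEMMAS AND PROOFS =====

theorem piece_on_square_witness :
    Dom_piece_on_square pvWitness_piece_on_square.1 pvWitness_piece_on_square.2.1 pvWitness_piece_on_square.2.2 ∧
    Pre_piece_on_square pvWitness_piece_on_square.1 pvWitness_piece_on_square.2.1 pvWitness_piece_on_square.2.2 := by
  decide

-- int of a one-character string is never negative (a sign needs a second character)
lemma pvOptNat_nonneg (o : Option Nat) :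
    0 ≤ (Option.map (fun n : Int => n) (o.bind fun a => pure ((a : Nat) : Int))).getD 0 := by
  cases o <;> simp

lemma pvIntVal_nonneg (y : Char) : 0 ≤ pvIntVal y := by
  unfold pvIntVal
  by_cases h1 : y = '-'
  · subst h1; decide
  · unfold PySem.Int.ofChars?
    by_cases hs : PySem.Int.isIntSpace y
    · simp only [PySem.Int.isIntSpace, Bool.or_eq_true, decide_eq_true_eq] at hs
      rcases hs with ((((h|h)|h)|h)|h)|h <;> subst h <;> decide
    · simp only [List.dropWhile_cons, hs, Bool.false_eq_true, ite_false,
        List.dropWhile_nil, List.reverse_cons, List.reverse_nil, List.nil_append]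
      split
      next ds heq => exact absurd (by simpa using congrArg (·.headI) heq) h1
      next ds heq => exact pvOptNat_nonneg _
      next heq h2 h3 => exact pvOptNat_nonneg _

lemma pvW_nonneg (y : Char) : 0 ≤ pvW y := by
  unfold pvW
  split_ifs
  · exact pvIntVal_nonneg y
  · norm_num
  · exact le_refl 0

lemma pvWeight_nonneg (cs : List Char) : 0 ≤ pvWeight cs := by
  apply List.sum_nonneg
  intro x hx
  obtain ⟨y, _, rfl⟩ := List.mem_map.mp hx
  exact pvW_nonneg y

lemma pvWeight_append (a b : List Char) : pvWeight (a ++ b) = pvWeight a + pvWeight b := by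
  simp [pvWeight]

-- prefix weights are monotone
lemma pvWeight_take_mono (cs : List Char) (i j : Nat) (hij : i ≤ j) :
    pvWeight (cs.take i) ≤ pvWeight (cs.take j) := by
  have h : cs.take j = cs.take i ++ (cs.take j).drop i := by
    conv_lhs => rw [← List.take_append_drop i (cs.take j)]
    rw [List.take_take, Nat.min_eq_left hij]
  rw [h, pvWeight_append]
  have := pvWeight_nonneg ((cs.take j).drop i)
  omega

lemma fenRowLoopA_eq (cs : List Char) : ∀ (r : Nat) (i row : Int) (x t : Nat),
    i + (r : Int) = row → r ≤ cs.count '/' →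
    fenRowLoopA i row x t cs = if r = 0 then t else x + pvRowStart r cs := by
  induction cs with
  | nil =>
    intro r i row x t hir hc
    simp at hc; subst hc
    rw [fenRowLoopA, if_neg (by omega)]
    simp
  | cons c rest ih =>
    intro r i row x t hir hc
    rcases Nat.eq_zero_or_pos r with hr | hr
    · subst hr
      rw [fenRowLoopA, if_neg (by omega)]
      simp
    · have hlt : i < row := by omega
      obtain ⟨r', rfl⟩ : ∃ r', r = r' + 1 := ⟨r - 1, by omega⟩
      rw [fenRowLoopA, if_pos hlt]
      by_cases hy : c = '/'
      · subst hy
        rw [if_pos rfl,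
          ih r' (i+1) row (x+1) (x+1) (by omega) (by simp at hc; omega)]
        rcases Nat.eq_zero_or_pos r' with h0 | h0
        · subst h0; simp [pvRowStart]
        · rw [if_neg (by omega), if_neg (by omega)]
          simp [pvRowStart]
          omega
      · rw [if_neg hy,
          ih (r'+1) i row (x+1) t (by omega) (by simpa [List.count_cons, hy] using hc)]
        simp [pvRowStart, hy]
        omega

lemma idxOf_slash (ds : List Char) (hm : '/' ∈ ds) :
    ∃ j, ds.idxOf? '/' = some j ∧ (∀ r, pvRowStart (r + 1) ds = j + 1 + pvRowStart r (ds.drop (j + 1)))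
      ∧ (ds.drop (j + 1)).count '/' + 1 = ds.count '/' := by
  induction ds with
  | nil => simp at hm
  | cons c rest ih =>
    by_cases hc : c = '/'
    · subst hc
      refine ⟨0, ?_, ?_, ?_⟩
      · simp [List.idxOf?_cons]
      · intro r; simp [pvRowStart]
      · simp
    · have hm' : '/' ∈ rest := by
        rcases List.mem_cons.mp hm with h | h
        · exact absurd h.symm hc
        · exact h
      obtain ⟨j, hj, hpv, hcnt⟩ := ih hm'
      refine ⟨j + 1, ?_, ?_, ?_⟩
      · simp [List.idxOf?_cons, hc, hj]
      · intro r
        simp [pvRowStart, hc, hpv r]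
        omega
      · simpa [List.count_cons, hc] using hcnt

lemma bRowLoop_eq (r : Nat) : ∀ (t : Nat) (cs : List Char), r ≤ (cs.drop t).count '/' →
    bRowLoop r t cs = some (t + pvRowStart r (cs.drop t)) := by
  induction r with
  | zero => intro t cs _; simp [bRowLoop, pvRowStart]
  | succ n ih =>
    intro t cs hc
    have hm : '/' ∈ cs.drop t := List.count_pos_iff.mp (by omega)
    obtain ⟨j, hj, hpv, hcnt⟩ := idxOf_slash _ hm
    rw [bRowLoop, bIdxFrom, hj]
    simp only [Option.map_some]
    rw [ih (t + j + 1) cs (by rw [show t + j + 1 = t + (j + 1) by omega, ← List.drop_drop]; omega)]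
    have hdd : List.drop (j + 1) (List.drop t cs) = List.drop (t + j + 1) cs := by
      rw [List.drop_drop]; congr 1
    rw [hpv n, hdd]
    simp only [Option.some.injEq]
    omega

-- the mathematical prefix-sum list: pvSums b cs lists b + weight of each nonempty prefix of cs
def pvSums (b : Int) : List Char → List Int
  | [] => []
  | y :: rest => (b + pvW y) :: pvSums (b + pvW y) rest

lemma pvSums_length (cs : List Char) : ∀ b, (pvSums b cs).length = cs.length := by
  induction cs with
  | nil => intro b; rfl
  | cons y rest ih => intro b; simp [pvSums, ih]

lemma pvSums_getD (cs : List Char) : ∀ (b : Int) (i : Nat), i < cs.length →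
    (pvSums b cs).getD i 0 = b + pvWeight (cs.take (i + 1)) := by
  induction cs with
  | nil => intro b i h; simp at h
  | cons y rest ih =>
    intro b i h
    cases i with
    | zero => simp [pvSums, pvWeight]
    | succ n =>
      simp only [pvSums, List.getD_cons_succ]
      rw [ih (b + pvW y) n (by simpa using h)]
      simp [pvWeight]
      ring

-- B's counts loop appends exactly the prefix sums
lemma bCountsLoop_eq (cs : List Char) : ∀ (pre : List Int) (x : Int),
    bCountsLoop (pre ++ [x]) cs = pre ++ [x] ++ pvSums x cs := by
  induction cs with
  | nil => intro pre x; simp [bCountsLoop, pvSums]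
  | cons y rest ih =>
    intro pre x
    rw [bCountsLoop]
    rw [PySem.List.pyGetD_neg_one_append_singleton]
    have hx : (if pvIsInt y then pvIntVal y else if PySem.Chars.isalpha y then 1 else 0) = pvW y := rfl
    rw [hx]
    rw [show pre ++ [x] ++ [x + pvW y] = (pre ++ [x]) ++ [x + pvW y] by simp]
    rw [ih (pre ++ [x]) (x + pvW y)]
    simp [pvSums]

-- value of counts[i]: the weight of the first i characters
lemma counts_getD (cs : List Char) (i : Nat) (h : i ≤ cs.length) :
    (((0 : Int) :: pvSums 0 cs)).getD i 0 = pvWeight (cs.take i) := by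
  cases i with
  | zero => simp [pvWeight]
  | succ n =>
    simp only [List.getD_cons_succ]
    rw [pvSums_getD cs 0 n (by omega)]
    omega

-- the binary search finds the least index whose count exceeds col
lemma bSearch_spec (counts : List Int) (col : Int)
    (hmono : ∀ i j : Nat, i ≤ j → j < counts.length → counts.getD i 0 ≤ counts.getD j 0) :
    ∀ (d lo hi : Nat), hi - lo ≤ d → lo ≤ hi → hi ≤ counts.length →
    (∀ i, i < lo → counts.getD i 0 ≤ col) →
    (∀ j, hi ≤ j → j < counts.length → col < counts.getD j 0) →
    (∀ i, i < bSearch counts col lo hi → counts.getD i 0 ≤ col) ∧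
      (∀ j, bSearch counts col lo hi ≤ j → j < counts.length → col < counts.getD j 0) ∧
      bSearch counts col lo hi ≤ hi := by
  intro d
  induction d with
  | zero =>
    intro lo hi hd hlh hhl h1 h2
    have : lo = hi := by omega
    subst this
    rw [bSearch, if_neg (by omega)]
    exact ⟨h1, h2, le_refl lo⟩
  | succ n ih =>
    intro lo hi hd hlh hhl h1 h2
    by_cases hlt : lo < hi
    · rw [bSearch, if_pos hlt]
      simp only []
      set mid := (lo + hi) / 2 with hmid
      have hm1 : lo ≤ mid := by omega
      have hm2 : mid < hi := by omega
      rw [PySem.List.pyGetD_natCast]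
      by_cases hc : counts.getD mid 0 ≤ col
      · rw [if_pos hc]
        exact ih (mid + 1) hi (by omega) (by omega) hhl
          (fun i hi2 => le_trans (hmono i mid (by omega) (by omega)) hc) h2
      · rw [if_neg hc]
        obtain ⟨a, b, c⟩ := ih lo mid (by omega) (by omega) (by omega) h1
          (fun j hj hjl => lt_of_lt_of_le (by omega) (hmono mid j hj hjl))
        exact ⟨a, b, by omega⟩
    · rw [bSearch, if_neg hlt]
      exact ⟨h1, fun j hj hjl => h2 j (by omega) hjl, by omega⟩

-- A's loop stops on the first character whose cumulative count exceeds col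
lemma pieceLoopA_least (cs : List Char) : ∀ (col counter : Int) (marker : Nat),
    counter ≤ col → col < counter + pvWeight cs →
    ∃ k, pieceLoopA col counter marker cs = some (marker + (k + 1)) ∧ k < cs.length ∧
      (∀ i, i ≤ k → counter + pvWeight (cs.take i) ≤ col) ∧
      col < counter + pvWeight (cs.take (k + 1)) := by
  induction cs with
  | nil => intro col counter marker hle hw; simp [pvWeight] at hw; omega
  | cons y rest ih =>
    intro col counter marker hle hw
    have hupd : (if pvIsInt y then counter + pvIntVal y
        else if PySem.Chars.isalpha y then counter + 1 else counter) = counter + pvW y := by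
      unfold pvW; split_ifs <;> ring
    rw [pieceLoopA, if_pos hle, hupd]
    have hwc : pvWeight (y :: rest) = pvW y + pvWeight rest := by simp [pvWeight]
    by_cases hstop : counter + pvW y ≤ col
    · obtain ⟨k, hk, hkl, hall, hcr⟩ :=
        ih col (counter + pvW y) (marker + 1) hstop (by rw [hwc] at hw; omega)
      refine ⟨k + 1, ?_, by simpa using hkl, ?_, ?_⟩
      · rw [hk]; congr 1; omega
      · intro i hik
        cases i with
        | zero => simpa [pvWeight] using hle
        | succ n =>
          rw [List.take_succ_cons, show pvWeight (y :: rest.take n) = pvW y + pvWeight (rest.take n) by simp [pvWeight]]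
          have := hall n (by omega)
          omega
      · rw [List.take_succ_cons, show pvWeight (y :: rest.take (k + 1)) = pvW y + pvWeight (rest.take (k + 1)) by simp [pvWeight]]
        omega
    · refine ⟨0, ?_, by simp, ?_, ?_⟩
      · rw [pieceLoopA.eq_def, if_neg hstop]
      · intro i hi
        simp only [Nat.le_zero] at hi
        subst hi
        simpa [pvWeight] using hle
      · rw [List.take_succ_cons, List.take_zero]
        simp only [pvWeight, List.map_cons, List.map_nil, List.sum_cons, List.sum_nil]
        omega

-- ===== VERDICT (by name: the statement is the Claim_ definition above) =====
theorem piece_on_square_spec : Claim_equal_piece_on_square := by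
  intro row col fen _hdom ⟨hcnt, hrest⟩
  unfold Spec_piece_on_square
  set cs := fen.toList with hcs
  set t := pvRowStart row.toNat cs with ht
  have hA : fenRowLoopA 0 row 0 0 cs = t := by
    by_cases hr : row ≤ 0
    · rw [fenRowLoopA.eq_def, if_neg (by omega)]
      rw [ht, Int.toNat_of_nonpos hr]
      simp [pvRowStart]
    · rw [fenRowLoopA_eq cs row.toNat 0 row 0 0 (by omega) (by omega)]
      rw [if_neg (by omega)]
      omega
  have hB : bRowLoop row.toNat 0 cs = some t := by
    rw [bRowLoop_eq row.toNat 0 cs (by simpa using (by omega : row.toNat ≤ cs.count '/'))]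
    simp [ht]
  set csd := cs.drop t with hcsd
  set counts : List Int := (0 : Int) :: pvSums 0 csd with hcounts
  have hcountseq : bCountsLoop [0] csd = counts := by
    have := bCountsLoop_eq csd [] 0
    simpa using this
  have hclen : counts.length = csd.length + 1 := by
    simp [hcounts, pvSums_length]
  have hS : ∀ i, i ≤ csd.length → counts.getD i 0 = pvWeight (csd.take i) :=
    fun i h => counts_getD csd i h
  have hmono : ∀ i j : Nat, i ≤ j → j < counts.length → counts.getD i 0 ≤ counts.getD j 0 := by
    intro i j hij hjl
    rw [hS i (by omega), hS j (by omega)]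
    exact pvWeight_take_mono csd i j hij
  -- the value A's loop returns, characterized as the least index with count > col
  obtain ⟨M, hMloop, hMle, hMlow, hMhigh⟩ :
      ∃ M, pieceLoopA col 0 0 csd = some M ∧ M ≤ csd.length ∧
        (∀ i, i < M → counts.getD i 0 ≤ col) ∧ col < counts.getD M 0 := by
    rcases hrest with ⟨hc0, hwt⟩ | ⟨hc0, _⟩
    · obtain ⟨k, hk, hkl, hall, hcr⟩ := pieceLoopA_least csd col 0 0 hc0 (by omega)
      refine ⟨k + 1, by simpa using hk, by omega, ?_, ?_⟩
      · intro i hik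
        rw [hS i (by omega)]
        have := hall i (by omega)
        omega
      · rw [hS (k + 1) (by omega)]
        omega
    · refine ⟨0, ?_, by omega, by omega, ?_⟩
      · rw [pieceLoopA.eq_def, if_neg (by omega)]
      · rw [hS 0 (by omega)]
        simp [pvWeight]
        omega
  -- the binary search returns the same index
  have hsearch : bSearch counts col 0 counts.length = M := by
    obtain ⟨hlow, hhigh, hle'⟩ := bSearch_spec counts col hmono counts.length 0 counts.length
      (by omega) (by omega) (by omega) (by omega) (by omega)
    set r := bSearch counts col 0 counts.length with hr
    by_cases hrM : r < M
    · have h1 := hMlow r hrM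
      have h2 := hhigh r (le_refl r) (by omega)
      omega
    · by_cases hMr : M < r
      · have h1 := hlow M hMr
        omega
      · omega
  show piece_on_square row col fen = piece_on_square_alt row col fen
  rw [piece_on_square, piece_on_square_alt]
  rw [← hcs, hA, hB]
  simp only [hMloop, ← hcsd, hcountseq, hsearch]
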